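-- pv_equiv track=rewrite | github.com/MiketheViking90/HeadFirstPython | src/ch12/reading_csv.py | list_comprehension_pattern
-- ===== SOURCE A (Python) =====
-- def list_comprehension_pattern(flights: dict):
--     times = []
--     for time in flights.keys():
--         times.append(time)
--
--     cities = []
--     for city in flights.values():
--         cities.append(city)
--     return times, cities
-- ===== SOURCE B (Python) =====
-- def list_comprehension_pattern(flights: dict):
--     if not flights:
--         return [], []
--     times, cities = zip(*flights.items())
--     return list(times), list(cities)
-- ===== Notes on version B (the rewrite author's own statement) =====
-- stated objective: idiomatic
-- what changed: Replaces the two explicit append loops with a zip(*items()) transpose (with an empty-dict guard), building both lists in one standard-library call instead of element-by-element appends.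
import Mathlib
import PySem

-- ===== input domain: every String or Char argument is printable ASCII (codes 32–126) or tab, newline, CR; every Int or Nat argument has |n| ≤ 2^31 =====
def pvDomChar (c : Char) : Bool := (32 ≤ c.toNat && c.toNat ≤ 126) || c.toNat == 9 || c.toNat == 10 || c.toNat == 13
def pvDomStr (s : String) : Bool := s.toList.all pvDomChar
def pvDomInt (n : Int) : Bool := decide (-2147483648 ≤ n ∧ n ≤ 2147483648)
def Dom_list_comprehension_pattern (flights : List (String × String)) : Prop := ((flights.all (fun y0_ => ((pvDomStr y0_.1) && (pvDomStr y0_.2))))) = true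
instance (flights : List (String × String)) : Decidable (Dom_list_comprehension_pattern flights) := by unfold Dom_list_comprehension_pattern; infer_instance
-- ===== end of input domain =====

-- ===== PORT A =====
-- B replaces A's two append loops with a zip(*items()) transpose (unzip) guarded for the empty dict; objective: idiomatic.
def list_comprehension_pattern (flights : List (String × String)) : List String × List String :=
  let times := flights.foldl (fun acc kv => acc ++ [kv.1]) []
  let cities := flights.foldl (fun acc kv => acc ++ [kv.2]) []
  (times, cities)

-- ===== PORT B =====
-- zip(*flights.items()) transposes the pair list; ported as List.unzip (the library transpose for pair lists).
def list_comprehension_pattern_alt (flights : List (String × String)) : List String × List String :=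
  if flights.isEmpty then ([], [])
  else flights.unzip

-- ===== PRECONDITION & SPEC =====
def Spec_list_comprehension_pattern (flights : List (String × String)) (out : List String × List String) : Prop := out = list_comprehension_pattern_alt flights
instance (flights : List (String × String)) (out : List String × List String) : Decidable (Spec_list_comprehension_pattern flights out) := by unfold Spec_list_comprehension_pattern; infer_instance

-- ===== CLAIM (what is proved, stated in full; the proofs are below) =====
def Claim_equal_list_comprehension_pattern : Prop := ∀ (flights : List (String × String)), Dom_list_comprehension_pattern flights → Spec_list_comprehension_pattern flights (list_comprehension_pattern flights)

-- ===== LEMMAS AND PROOFS =====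
theorem pv_foldl_append_map {α β : Type} (l : List α) (f : α → β) (acc : List β) :
    l.foldl (fun acc x => acc ++ [f x]) acc = acc ++ l.map f := by
  induction l generalizing acc with
  | nil => simp
  | cons x xs ih => simp [List.foldl, ih]

theorem pv_flatten_singleton {α β : Type} (l : List α) (f : α → β) :
    (l.map (fun x => [f x])).flatten = l.map f := by
  induction l with
  | nil => rfl
  | cons x xs ih => simp [ih]

-- ===== VERDICT (by name: the statement is the Claim_ definition above) =====
theorem list_comprehension_pattern_spec : Claim_equal_list_comprehension_pattern := by
  intro flights _
  unfold Spec_list_comprehension_pattern list_comprehension_pattern list_comprehension_pattern_alt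
  by_cases h : flights.isEmpty
  · simp_all [List.isEmpty_iff]
  · simp [h, pv_foldl_append_map, List.unzip_eq_map, pv_flatten_singleton]
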